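-- pv_equiv track=rewrite | github.com/scotthlee/injury-autocoding | src/tools/text.py | remove_numerals
-- ===== SOURCE A (Python) =====
-- def remove_numerals(docs):
--     docs = [doc.replace('0', ' zero ') for doc in docs]
--     docs = [doc.replace('1', ' one ') for doc in docs]
--     docs = [doc.replace('2', ' two ') for doc in docs]
--     docs = [doc.replace('3', ' three ') for doc in docs]
--     docs = [doc.replace('4', ' four ') for doc in docs]
--     docs = [doc.replace('5', ' five ') for doc in docs]
--     docs = [doc.replace('6', ' six ') for doc in docs]
--     docs = [doc.replace('7', ' seven ') for doc in docs]
--     docs = [doc.replace('8', ' eight ') for doc in docs]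
--     docs = [doc.replace('9', ' nine ') for doc in docs]
--     return docs
-- ===== SOURCE B (Python) =====
-- def remove_numerals(docs):
--     table = {'0': ' zero ', '1': ' one ', '2': ' two ', '3': ' three ',
--              '4': ' four ', '5': ' five ', '6': ' six ', '7': ' seven ',
--              '8': ' eight ', '9': ' nine '}
--     return [''.join(table.get(c, c) for c in doc) for doc in docs]
-- ===== Notes on version B (the rewrite author's own statement) =====
-- stated objective: simpler
-- what changed: Replaces the ten successive list-rebuilding .replace passes with one table-driven pass per document: a digit->word dict built once and a single character scan joining table.get(c, c).
import Mathlib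
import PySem

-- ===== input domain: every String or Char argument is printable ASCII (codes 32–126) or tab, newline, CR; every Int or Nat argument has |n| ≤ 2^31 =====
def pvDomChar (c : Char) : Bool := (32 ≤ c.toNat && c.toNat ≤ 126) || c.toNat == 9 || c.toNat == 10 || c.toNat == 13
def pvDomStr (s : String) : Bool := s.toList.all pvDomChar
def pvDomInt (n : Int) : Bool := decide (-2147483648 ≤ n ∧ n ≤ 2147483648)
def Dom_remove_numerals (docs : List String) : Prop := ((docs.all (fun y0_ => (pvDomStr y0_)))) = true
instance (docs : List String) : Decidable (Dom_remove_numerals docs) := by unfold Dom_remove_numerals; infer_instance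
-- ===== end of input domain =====

-- B replaces A's ten successive whole-list .replace passes with a digit->word table and a
-- single character-by-character pass per document (simpler: one scan instead of ten).

-- ===== PORT A =====
-- literal transliteration: ten list comprehensions, each a full .replace pass
def remove_numerals (docs : List String) : List String :=
  let docs := docs.map (fun doc => PySem.Str.replace doc "0" " zero ")
  let docs := docs.map (fun doc => PySem.Str.replace doc "1" " one ")
  let docs := docs.map (fun doc => PySem.Str.replace doc "2" " two ")
  let docs := docs.map (fun doc => PySem.Str.replace doc "3" " three ")
  let docs := docs.map (fun doc => PySem.Str.replace doc "4" " four ")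
  let docs := docs.map (fun doc => PySem.Str.replace doc "5" " five ")
  let docs := docs.map (fun doc => PySem.Str.replace doc "6" " six ")
  let docs := docs.map (fun doc => PySem.Str.replace doc "7" " seven ")
  let docs := docs.map (fun doc => PySem.Str.replace doc "8" " eight ")
  let docs := docs.map (fun doc => PySem.Str.replace doc "9" " nine ")
  docs

-- ===== PORT B =====
-- the dict built once in Source B
def pvTable : PySem.Dict Char String :=
  PySem.Dict.ofList [('0', " zero "), ('1', " one "), ('2', " two "), ('3', " three "),
                     ('4', " four "), ('5', " five "), ('6', " six "), ('7', " seven "),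
                     ('8', " eight "), ('9', " nine ")]

-- ''.join(table.get(c, c) for c in doc) for each doc
def remove_numerals_alt (docs : List String) : List String :=
  docs.map (fun doc =>
    PySem.Str.join "" (doc.toList.map (fun c => pvTable.getD c (String.ofList [c]))))

-- ===== PRECONDITION & SPEC =====
def Spec_remove_numerals (docs : List String) (out : List String) : Prop := out = remove_numerals_alt docs
instance (docs : List String) (out : List String) : Decidable (Spec_remove_numerals docs out) := by unfold Spec_remove_numerals; infer_instance

-- ===== CLAIM (what is proved, stated in full; the proofs are below) =====
def Claim_equal_remove_numerals : Prop := ∀ (docs : List String), Dom_remove_numerals docs → Spec_remove_numerals docs (remove_numerals docs)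

-- ===== LEMMAS AND PROOFS =====

-- first-match expansion of a character by an association list of (digit, word) pairs
def pvExpand : List (Char × List Char) → Char → List Char
  | [], c => [c]
  | (d, w) :: ps, c => if c = d then w else pvExpand ps c

-- the full table, on the List Char side
def pvPairs : List (Char × List Char) :=
  [('0', " zero ".toList), ('1', " one ".toList), ('2', " two ".toList), ('3', " three ".toList),
   ('4', " four ".toList), ('5', " five ".toList), ('6', " six ".toList), ('7', " seven ".toList),
   ('8', " eight ".toList), ('9', " nine ".toList)]

theorem pv_go_single (d : Char) (w : List Char) :
    ∀ (l acc : List Char) (fuel : Nat), l.length ≤ fuel →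
      PySem.Chars.replace.go [d] w fuel l acc
        = acc.reverse ++ l.flatMap (fun c => if c = d then w else [c]) := by
  intro l
  induction l with
  | nil => intro acc fuel _; cases fuel <;> simp [PySem.Chars.replace.go]
  | cons c t ih =>
    intro acc fuel hf
    cases fuel with
    | zero => simp at hf
    | succ f =>
      simp only [PySem.Chars.replace.go]
      by_cases hc : c = d
      · subst hc
        simp [List.isPrefixOf, ih (w.reverse ++ acc) f (by simpa using hf)]
      · simp [List.isPrefixOf, hc, ih (c :: acc) f (by simpa using hf), Ne.symm hc]

-- replacing a single character is a flatMap over the characters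
theorem pv_replace_single (l : List Char) (d : Char) (w : List Char) :
    PySem.Chars.replace l [d] w = l.flatMap (fun c => if c = d then w else [c]) := by
  simp [PySem.Chars.replace, pv_go_single d w l [] l.length le_rfl]

theorem pv_flatMap_id_of_not_mem (d : Char) (w l : List Char) (h : d ∉ l) :
    l.flatMap (fun x => if x = d then w else [x]) = l := by
  induction l with
  | nil => rfl
  | cons x t ih =>
    simp only [List.mem_cons, not_or] at h
    rw [List.flatMap_cons, if_neg (fun hx => h.1 hx.symm), ih h.2]
    rfl

-- one replace pass on an already-expanded list appends one pair to the table
theorem pv_expand_step (ps : List (Char × List Char)) (d : Char) (w : List Char)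
    (hkey : ∀ p ∈ ps, p.1 ≠ d) (hword : ∀ p ∈ ps, d ∉ p.2) (c : Char) :
    (pvExpand ps c).flatMap (fun x => if x = d then w else [x]) = pvExpand (ps ++ [(d, w)]) c := by
  induction ps with
  | nil => simp [pvExpand]
  | cons p ps ih =>
    obtain ⟨d', w'⟩ := p
    by_cases hc : c = d'
    · simp only [pvExpand, List.cons_append, hc]
      exact pv_flatMap_id_of_not_mem d w w' (hword (d', w') (by simp))
    · simp only [pvExpand, List.cons_append, if_neg hc]
      exact ih (fun p hp => hkey p (by simp [hp])) (fun p hp => hword p (by simp [hp]))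

theorem pv_step (ps : List (Char × List Char)) (d : Char) (w : List Char)
    (hkey : ∀ p ∈ ps, p.1 ≠ d) (hword : ∀ p ∈ ps, d ∉ p.2) (l : List Char) :
    PySem.Chars.replace (l.flatMap (pvExpand ps)) [d] w = l.flatMap (pvExpand (ps ++ [(d, w)])) := by
  rw [pv_replace_single, List.flatMap_assoc]
  exact List.flatMap_congr (fun c _ => pv_expand_step ps d w hkey hword c)

theorem pv_flatMap_nil_pairs (l : List Char) : l.flatMap (pvExpand []) = l := by
  simp [pvExpand]

-- the ten chained replaces, on List Char, equal one expansion by the full table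
theorem pv_chain (l : List Char) :
    PySem.Chars.replace (PySem.Chars.replace (PySem.Chars.replace (PySem.Chars.replace
      (PySem.Chars.replace (PySem.Chars.replace (PySem.Chars.replace (PySem.Chars.replace
      (PySem.Chars.replace (PySem.Chars.replace l ['0'] " zero ".toList) ['1'] " one ".toList)
      ['2'] " two ".toList) ['3'] " three ".toList) ['4'] " four ".toList) ['5'] " five ".toList)
      ['6'] " six ".toList) ['7'] " seven ".toList) ['8'] " eight ".toList) ['9'] " nine ".toList
    = l.flatMap (pvExpand pvPairs) := by
  conv_lhs => rw [show l = l.flatMap (pvExpand []) from (pv_flatMap_nil_pairs l).symm]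
  rw [pv_step [] '0' _ (by decide) (by decide) l]
  rw [pv_step _ '1' _ (by decide) (by decide) l]
  rw [pv_step _ '2' _ (by decide) (by decide) l]
  rw [pv_step _ '3' _ (by decide) (by decide) l]
  rw [pv_step _ '4' _ (by decide) (by decide) l]
  rw [pv_step _ '5' _ (by decide) (by decide) l]
  rw [pv_step _ '6' _ (by decide) (by decide) l]
  rw [pv_step _ '7' _ (by decide) (by decide) l]
  rw [pv_step _ '8' _ (by decide) (by decide) l]
  rw [pv_step _ '9' _ (by decide) (by decide) l]
  simp [pvPairs]

theorem pv_join_nil_flatten (l : List (List Char)) : PySem.Chars.join [] l = l.flatten := by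
  induction l with
  | nil => rfl
  | cons h t ih =>
    cases t with
    | nil => simp [PySem.Chars.join, List.intercalate]
    | cons h2 t2 =>
      simp only [PySem.Chars.join, List.intercalate] at *
      simp [List.intersperse] at *
      exact ih

-- the dict lookup agrees with pvExpand on the List Char side
theorem pv_table_toList (c : Char) :
    (pvTable.getD c (String.ofList [c])).toList = pvExpand pvPairs c := by
  by_cases h0 : c = '0'; · subst h0; decide
  by_cases h1 : c = '1'; · subst h1; decide
  by_cases h2 : c = '2'; · subst h2; decide
  by_cases h3 : c = '3'; · subst h3; decide
  by_cases h4 : c = '4'; · subst h4; decide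
  by_cases h5 : c = '5'; · subst h5; decide
  by_cases h6 : c = '6'; · subst h6; decide
  by_cases h7 : c = '7'; · subst h7; decide
  by_cases h8 : c = '8'; · subst h8; decide
  by_cases h9 : c = '9'; · subst h9; decide
  simp only [pvTable, pvPairs, PySem.Dict.getD, PySem.Dict.get?, PySem.Dict.ofList,
    PySem.Dict.empty, PySem.Dict.update, PySem.Dict.insert, PySem.Dict.contains, pvExpand]
  have e0 : ('0' == c) = false := beq_eq_false_iff_ne.mpr (Ne.symm h0)
  have e1 : ('1' == c) = false := beq_eq_false_iff_ne.mpr (Ne.symm h1)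
  have e2 : ('2' == c) = false := beq_eq_false_iff_ne.mpr (Ne.symm h2)
  have e3 : ('3' == c) = false := beq_eq_false_iff_ne.mpr (Ne.symm h3)
  have e4 : ('4' == c) = false := beq_eq_false_iff_ne.mpr (Ne.symm h4)
  have e5 : ('5' == c) = false := beq_eq_false_iff_ne.mpr (Ne.symm h5)
  have e6 : ('6' == c) = false := beq_eq_false_iff_ne.mpr (Ne.symm h6)
  have e7 : ('7' == c) = false := beq_eq_false_iff_ne.mpr (Ne.symm h7)
  have e8 : ('8' == c) = false := beq_eq_false_iff_ne.mpr (Ne.symm h8)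
  have e9 : ('9' == c) = false := beq_eq_false_iff_ne.mpr (Ne.symm h9)
  simp [List.find?, e0, e1, e2, e3, e4, e5, e6, e7, e8, e9, h0, h1, h2, h3, h4, h5, h6, h7, h8, h9, String.toList_ofList]

-- B's per-document string is the expansion by the full table
theorem pv_alt_doc (doc : String) :
    (PySem.Str.join "" (doc.toList.map (fun c => pvTable.getD c (String.ofList [c])))).toList
      = doc.toList.flatMap (pvExpand pvPairs) := by
  rw [PySem.Str.toList_join]
  simp only [List.map_map]
  rw [show ("" : String).toList = [] from rfl, pv_join_nil_flatten]
  rw [List.flatMap_def]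
  congr 1
  exact List.map_congr_left (fun c _ => pv_table_toList c)

-- ===== VERDICT (by name: the statement is the Claim_ definition above) =====
theorem remove_numerals_spec : Claim_equal_remove_numerals := by
  intro docs _
  unfold Spec_remove_numerals remove_numerals remove_numerals_alt
  simp only [List.map_map]
  apply List.map_congr_left
  intro doc _
  apply String.toList_inj.mp
  rw [pv_alt_doc]
  simp only [Function.comp]
  rw [← pv_chain doc.toList]
  simp only [PySem.Str.toList_replace]
  rfl
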